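-- pv_equiv track=rewrite | github.com/neuralsorcerer/minitensor | minitensor/tensor.py | _normalize_device
-- ===== SOURCE A (Python) =====
-- from typing import Any, ClassVar, Dict, List, Optional, Sequence, Tuple, Union
--
-- def _normalize_device(device: Optional[str]) -> Optional[str]:
--     """Normalize device strings returned from the Rust backend."""
--
--     if device is None:
--         return None
--
--     if isinstance(device, str) and device.startswith("device"):
--         try:
--             inside = device.split("{", 1)[1].split("}", 1)[0]
--             fields = {}
--             for part in inside.split(","):
--                 if ":" in part:
--                     key, value = part.split(":", 1)
--                     fields[key.strip()] = value.strip()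
--             device_type = fields.get("device_type")
--             device_id = fields.get("device_id")
--             if device_type:
--                 if not device_id or device_id in {"none", "default"}:
--                     return device_type
--                 return f"{device_type}:{device_id}"
--         except Exception:
--             return device
--     return device
-- ===== SOURCE B (Python) =====
-- def _normalize_device(device):
--     if device is None:
--         return None
--     if not device.startswith("device"):
--         return device
--     pieces = device.split("{", 1)
--     if len(pieces) < 2:
--         return device
--     inside = pieces[1].split("}", 1)[0]
--     device_type = None
--     device_id = None
--     key, val, seen_colon = [], [], False
--     for ch in inside + ",":
--         if ch == ",":
--             if seen_colon:
--                 k = "".join(key).strip()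
--                 if k == "device_type":
--                     device_type = "".join(val).strip()
--                 elif k == "device_id":
--                     device_id = "".join(val).strip()
--             key, val, seen_colon = [], [], False
--         elif ch == ":" and not seen_colon:
--             seen_colon = True
--         elif seen_colon:
--             val.append(ch)
--         else:
--             key.append(ch)
--     if device_type:
--         if not device_id or device_id in ("none", "default"):
--             return device_type
--         return device_type + ":" + device_id
--     return device
-- ===== Notes on version B (the rewrite author's own statement) =====
-- stated objective: alternative
-- what changed: Replaces A's try/except with an explicit length guard on the brace split and replaces the split-on-commas/split-on-colon dict-building loop by a single character-level state machine over the brace body (key/value buffers with a seen-colon flag, flushed at each comma, last field wins), with no dict and no exception handling.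
import Mathlib
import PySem

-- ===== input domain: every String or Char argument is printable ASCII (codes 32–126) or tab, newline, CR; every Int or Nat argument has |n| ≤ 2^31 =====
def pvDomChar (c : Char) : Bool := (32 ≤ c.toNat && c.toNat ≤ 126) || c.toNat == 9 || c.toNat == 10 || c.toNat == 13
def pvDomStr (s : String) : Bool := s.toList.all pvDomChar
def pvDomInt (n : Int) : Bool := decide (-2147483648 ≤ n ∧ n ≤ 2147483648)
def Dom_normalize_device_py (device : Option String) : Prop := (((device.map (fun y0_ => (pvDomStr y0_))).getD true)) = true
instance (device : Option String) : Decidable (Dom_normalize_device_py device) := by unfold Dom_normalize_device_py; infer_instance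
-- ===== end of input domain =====

-- B replaces A's try/except + split-on-commas/split-on-colon dict-building loop by an explicit
-- length guard on the brace split and a single character-level state machine over the brace body
-- (key/value buffers + seen-colon flag, flushed at each comma, last field wins); alternative algorithm.

-- ===== PORT A =====
-- helper: one iteration of A's `for part in inside.split(",")` dict loop
def pvFieldsStep (f : PySem.Dict String String) (part : String) : PySem.Dict String String :=
  if PySem.Str.isIn ":" part then
    let kv := (PySem.Str.splitMax? part ":" 1).getD []
    f.insert (PySem.Str.strip (kv.headD "")) (PySem.Str.strip (kv.getD 1 ""))
  else f

def normalize_device_py (device : Option String) : Option String :=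
  match device with
  | none => none
  | some d =>
    if PySem.Str.startswith d "device" then
      -- try: inside = device.split("{", 1)[1].split("}", 1)[0]  (IndexError → except → return device)
      match ((PySem.Str.splitMax? d "{" 1).getD [])[1]? with
      | none => some d
      | some tail =>
        let inside := ((PySem.Str.splitMax? tail "}" 1).getD []).headD ""
        let fields := ((PySem.Str.split? inside ",").getD []).foldl pvFieldsStep PySem.Dict.empty
        let device_type := fields.get? "device_type"
        let device_id := fields.get? "device_id"
        match device_type with
        | some t =>
          if t ≠ "" then
            match device_id with
            | none => some t
            | some i =>
              if i = "" ∨ i = "none" ∨ i = "default" then some t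
              else some (t ++ ":" ++ i)
          else some d
        | none => some d
    else some d

-- ===== PORT B =====
-- machine state: (device_type, device_id, key buffer, val buffer, seen_colon)
def pvMachStep (st : Option (List Char) × Option (List Char) × List Char × List Char × Bool)
    (ch : Char) : Option (List Char) × Option (List Char) × List Char × List Char × Bool :=
  let (dt, di, key, val, seen) := st
  if ch = ',' then
    if seen then
      let k := PySem.Chars.strip key
      if k = "device_type".toList then (some (PySem.Chars.strip val), di, [], [], false)
      else if k = "device_id".toList then (dt, some (PySem.Chars.strip val), [], [], false)
      else (dt, di, [], [], false)
    else (dt, di, [], [], false)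
  else if ch = ':' ∧ seen = false then (dt, di, key, val, true)
  else if seen then (dt, di, key, val ++ [ch], seen)
  else (dt, di, key ++ [ch], val, seen)

def normalize_device_py_alt (device : Option String) : Option String :=
  match device with
  | none => none
  | some d =>
    if ¬ PySem.Str.startswith d "device" then some d
    else
      let pieces := (PySem.Str.splitMax? d "{" 1).getD []
      if pieces.length < 2 then some d
      else
        let inside := ((PySem.Str.splitMax? (pieces.getD 1 "") "}" 1).getD []).headD ""
        let fin := (inside.toList ++ [',']).foldl pvMachStep (none, none, [], [], false)
        match fin.1 with
        | some t =>
          if t ≠ [] then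
            match fin.2.1 with
            | none => some (String.ofList t)
            | some i =>
              if i = [] ∨ i = "none".toList ∨ i = "default".toList then some (String.ofList t)
              else some (String.ofList (t ++ ':' :: i))
          else some d
        | none => some d

-- ===== PRECONDITION & SPEC =====
def Spec_normalize_device_py (device : Option String) (out : Option String) : Prop := out = normalize_device_py_alt device
instance (device : Option String) (out : Option String) : Decidable (Spec_normalize_device_py device out) := by unfold Spec_normalize_device_py; infer_instance

-- ===== CLAIM (what is proved, stated in full; the proofs are below) =====
def Claim_equal_normalize_device_py : Prop := ∀ (device : Option String), Dom_normalize_device_py device → Spec_normalize_device_py device (normalize_device_py device)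

-- ===== LEMMAS AND PROOFS =====

-- ghost: Python's s.split(",") on the char level (structural recursion)
def pvSplitC : List Char → List (List Char)
  | [] => [[]]
  | a :: rest =>
    if a = ',' then [] :: pvSplitC rest
    else
      match pvSplitC rest with
      | [] => [[a]]
      | p :: ps => (a :: p) :: ps

theorem pvSplitC_ne_nil (cs : List Char) : pvSplitC cs ≠ [] := by
  cases cs with
  | nil => simp [pvSplitC]
  | cons a rest =>
    simp only [pvSplitC]
    split_ifs
    · simp
    · cases h : pvSplitC rest <;> simp

-- go of splitOn with m = 0 dumps the remainder
theorem pvGoMax_zero (sep : List Char) (fuel : Nat) (l cur : List Char) (acc : List (List Char)) :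
    PySem.Chars.splitOnMax.go sep fuel 0 l cur acc = acc.reverse ++ [cur.reverse ++ l] := by
  cases fuel <;> cases l <;> simp [PySem.Chars.splitOnMax.go]

-- splitOnMax.go with maxsplit 1, single-char separator
theorem pvGoMax_one (c : Char) (l : List Char) (fuel : Nat) (cur : List Char)
    (acc : List (List Char)) (hf : l.length < fuel) :
    PySem.Chars.splitOnMax.go [c] fuel 1 l cur acc =
      acc.reverse ++ (if c ∈ l then
        [cur.reverse ++ l.takeWhile (· ≠ c), (l.dropWhile (· ≠ c)).drop 1]
      else [cur.reverse ++ l]) := by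
  induction l generalizing fuel cur acc with
  | nil =>
    cases fuel with
    | zero => omega
    | succ f => simp [PySem.Chars.splitOnMax.go]
  | cons a rest ih =>
    cases fuel with
    | zero => omega
    | succ f =>
      simp only [PySem.Chars.splitOnMax.go]
      by_cases hac : a = c
      · subst hac
        simp [pvGoMax_zero, List.takeWhile, List.dropWhile]
      · have hpre : [c].isPrefixOf (a :: rest) = false := by
          simp [List.isPrefixOf, Ne.symm hac]
        rw [if_neg (by omega : ¬ (1 : Nat) = 0), hpre]
        simp only [Bool.false_eq_true, if_false]
        rw [ih f (a :: cur) acc (by simpa using Nat.lt_of_succ_lt_succ hf)]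
        by_cases hmem : c ∈ rest
        · simp [hmem, hac, Ne.symm hac]
        · simp [hmem, Ne.symm hac]

-- Python's part.split(":", 1) on the char level
theorem pvSplitMaxOne (c : Char) (cs : List Char) :
    PySem.Chars.splitOnMax cs [c] 1 =
      if c ∈ cs then [cs.takeWhile (· ≠ c), (cs.dropWhile (· ≠ c)).drop 1] else [cs] := by
  unfold PySem.Chars.splitOnMax
  rw [if_neg (by omega : ¬ (1:Int) < 0)]
  simpa using pvGoMax_one c cs (cs.length + 1) [] [] (by omega)

-- splitOn.go for a single-char separator computes pvSplitC
theorem pvGoSplit (l : List Char) (fuel : Nat) (cur : List Char) (acc : List (List Char))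
    (hf : l.length < fuel) :
    PySem.Chars.splitOn.go [','] fuel l cur acc =
      acc.reverse ++ (cur.reverse ++ (pvSplitC l).headD []) :: (pvSplitC l).tail := by
  induction l generalizing fuel cur acc with
  | nil =>
    cases fuel with
    | zero => omega
    | succ f => simp [PySem.Chars.splitOn.go, pvSplitC]
  | cons a rest ih =>
    cases fuel with
    | zero => omega
    | succ f =>
      simp only [PySem.Chars.splitOn.go]
      by_cases hac : a = ','
      · subst hac
        simp only [List.isPrefixOf, BEq.rfl, Bool.and_true, if_true, List.length_cons,
          List.length_nil, Nat.zero_add, List.drop_succ_cons, List.drop_zero]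
        rw [ih f [] (cur.reverse :: acc) (by simpa using Nat.lt_of_succ_lt_succ hf)]
        have := pvSplitC_ne_nil rest
        cases h : pvSplitC rest with
        | nil => exact absurd h this
        | cons p ps => simp [pvSplitC, h]
      · have hpre : [','].isPrefixOf (a :: rest) = false := by
          simp [List.isPrefixOf, Ne.symm hac]
        rw [hpre]
        simp only [Bool.false_eq_true, if_false]
        rw [ih f (a :: cur) acc (by simpa using Nat.lt_of_succ_lt_succ hf)]
        have := pvSplitC_ne_nil rest
        cases h : pvSplitC rest with
        | nil => exact absurd h this
        | cons p ps => simp [pvSplitC, hac, h]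

theorem pvSplitOn_comma (cs : List Char) :
    PySem.Chars.splitOn cs [','] = pvSplitC cs := by
  unfold PySem.Chars.splitOn
  rw [pvGoSplit cs (cs.length + 1) [] [] (by omega)]
  have := pvSplitC_ne_nil cs
  cases h : pvSplitC cs with
  | nil => exact absurd h this
  | cons p ps => simp

-- the parts of pvSplitC are comma-free and rejoin to the input
def pvJoinC : List (List Char) → List Char
  | [] => []
  | [p] => p
  | p :: q :: ps => p ++ ',' :: pvJoinC (q :: ps)

theorem pvJoin_split (cs : List Char) : pvJoinC (pvSplitC cs) = cs := by
  induction cs with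
  | nil => simp [pvSplitC, pvJoinC]
  | cons a rest ih =>
    simp only [pvSplitC]
    by_cases hac : a = ','
    · subst hac
      rw [if_pos rfl]
      have := pvSplitC_ne_nil rest
      cases h : pvSplitC rest with
      | nil => exact absurd h this
      | cons p ps => rw [h] at ih; simpa [pvJoinC] using ih
    · rw [if_neg hac]
      cases h : pvSplitC rest with
      | nil => exact absurd h (pvSplitC_ne_nil rest)
      | cons p ps =>
        rw [h] at ih
        cases ps with
        | nil => simpa [pvJoinC] using ih
        | cons q qs => simpa [pvJoinC] using ih

theorem pvSplitC_comma_free (cs : List Char) : ∀ p ∈ pvSplitC cs, ',' ∉ p := by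
  induction cs with
  | nil => simp [pvSplitC]
  | cons a rest ih =>
    by_cases hac : a = ','
    · subst hac; simpa [pvSplitC] using ih
    · cases h : pvSplitC rest with
      | nil => exact absurd h (pvSplitC_ne_nil rest)
      | cons p ps =>
        have hg : pvSplitC (a :: rest) = (a :: p) :: ps := by simp [pvSplitC, hac, h]
        rw [hg]
        rw [h] at ih
        intro q hq
        rcases List.mem_cons.mp hq with rfl | hq
        · intro hc
          rcases List.mem_cons.mp hc with rfl | hc
          · exact hac rfl
          · exact ih p (by simp) hc
        · exact ih q (by simp [hq])

-- ghost: per-part effect on the (device_type, device_id) pair, last write wins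
def pvPairStep (ab : Option (List Char) × Option (List Char)) (p : List Char) :
    Option (List Char) × Option (List Char) :=
  if ':' ∈ p then
    if PySem.Chars.strip (p.takeWhile (· ≠ ':')) = "device_type".toList then
      (some (PySem.Chars.strip ((p.dropWhile (· ≠ ':')).drop 1)), ab.2)
    else if PySem.Chars.strip (p.takeWhile (· ≠ ':')) = "device_id".toList then
      (ab.1, some (PySem.Chars.strip ((p.dropWhile (· ≠ ':')).drop 1)))
    else ab
  else ab

-- ===== A-side: the dict fold projects to the ghost pair fold =====
theorem pvA_pair (cps : List (List Char)) (d : PySem.Dict String String) :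
    ((cps.map String.ofList).foldl pvFieldsStep d).get? "device_type" =
      (cps.foldl pvPairStep ((d.get? "device_type").map String.toList,
        (d.get? "device_id").map String.toList)).1.map String.ofList ∧
    ((cps.map String.ofList).foldl pvFieldsStep d).get? "device_id" =
      (cps.foldl pvPairStep ((d.get? "device_type").map String.toList,
        (d.get? "device_id").map String.toList)).2.map String.ofList := by
  induction cps generalizing d with
  | nil =>
    constructor <;> simp <;> (cases d.get? "device_type" <;> cases d.get? "device_id" <;> simp)
  | cons p rest ih =>
    simp only [List.map_cons, List.foldl_cons]
    by_cases hcp : ':' ∈ p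
    · have hin : PySem.Str.isIn ":" (String.ofList p) = true := by
        simp [PySem.Str.isIn, String.toList_ofList, PySem.Chars.isIn_iff_infix,
          List.singleton_infix_iff, hcp]
      have hkv : (PySem.Str.splitMax? (String.ofList p) ":" 1).getD [] =
          [String.ofList (p.takeWhile (· ≠ ':')), String.ofList ((p.dropWhile (· ≠ ':')).drop 1)] := by
        simp only [PySem.Str.splitMax?, PySem.Chars.splitMax?, String.toList_ofList]
        rw [show (":" : String).toList = [':'] from rfl, pvSplitMaxOne ':' p, if_pos hcp]
        simp
      have hstep : pvFieldsStep d (String.ofList p) =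
          d.insert (String.ofList (PySem.Chars.strip (p.takeWhile (· ≠ ':'))))
            (String.ofList (PySem.Chars.strip ((p.dropWhile (· ≠ ':')).drop 1))) := by
        simp only [pvFieldsStep, hin, if_true, hkv]
        simp [PySem.Str.strip, String.toList_ofList]
      have hofeq : ∀ (x : List Char) (t : String), String.ofList x = t ↔ x = t.toList := by
        intro x t
        constructor
        · intro hx; have := congrArg String.toList hx; simpa [String.toList_ofList] using this
        · intro hx; rw [hx, String.ofList_toList]
      rw [hstep]
      set K := String.ofList (PySem.Chars.strip (p.takeWhile (· ≠ ':'))) with hK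
      set V := String.ofList (PySem.Chars.strip ((p.dropWhile (· ≠ ':')).drop 1)) with hV
      have e1 : (((d.insert K V).get? "device_type").map String.toList,
          ((d.insert K V).get? "device_id").map String.toList) =
          pvPairStep ((d.get? "device_type").map String.toList,
            (d.get? "device_id").map String.toList) p := by
        unfold pvPairStep
        rw [if_pos hcp]
        by_cases h1 : PySem.Chars.strip (p.takeWhile (· ≠ ':')) = "device_type".toList
        · have hKt : K = "device_type" := (hofeq _ _).mpr h1
          rw [if_pos h1, hKt]
          rw [PySem.Dict.get?_insert_self, PySem.Dict.get?_insert_of_ne _ _ (by decide)]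
          simp [hV, String.toList_ofList]
        · have hKt : K ≠ "device_type" := fun hc => h1 ((hofeq _ _).mp hc)
          rw [if_neg h1]
          by_cases h2 : PySem.Chars.strip (p.takeWhile (· ≠ ':')) = "device_id".toList
          · have hKi : K = "device_id" := (hofeq _ _).mpr h2
            rw [if_pos h2, hKi]
            rw [PySem.Dict.get?_insert_self, PySem.Dict.get?_insert_of_ne _ _ (by decide)]
            simp [hV, String.toList_ofList]
          · have hKi : K ≠ "device_id" := fun hc => h2 ((hofeq _ _).mp hc)
            rw [if_neg h2]
            rw [PySem.Dict.get?_insert_of_ne _ _ (Ne.symm hKt), PySem.Dict.get?_insert_of_ne _ _ (Ne.symm hKi)]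
      rcases ih (d.insert K V) with ⟨ih1, ih2⟩
      rw [e1] at ih1 ih2
      exact ⟨ih1, ih2⟩
    · have hin : PySem.Chars.isIn [':'] p = false := by
        rw [PySem.Chars.isIn_eq_false_iff]
        simpa [List.singleton_infix_iff] using hcp
      have hstep : pvFieldsStep d (String.ofList p) = d := by
        simp [pvFieldsStep, String.toList_ofList, hin]
      have hpair : pvPairStep ((d.get? "device_type").map String.toList,
          (d.get? "device_id").map String.toList) p =
          ((d.get? "device_type").map String.toList, (d.get? "device_id").map String.toList) := by
        unfold pvPairStep; rw [if_neg hcp]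
      rw [hstep, hpair]
      exact ih d

-- ===== B-side: the machine over a comma-free part with the trailing comma =====
theorem pvMach_seen (p : List Char) (hp : ',' ∉ p) (dt di : Option (List Char))
    (key val : List Char) :
    p.foldl pvMachStep (dt, di, key, val, true) = (dt, di, key, val ++ p, true) := by
  induction p generalizing val with
  | nil => simp
  | cons ch rest ih =>
    have hch : ch ≠ ',' := fun h => hp (by simp [h])
    have hrest : ',' ∉ rest := fun h => hp (by simp [h])
    have hstep : pvMachStep (dt, di, key, val, true) ch = (dt, di, key, val ++ [ch], true) := by
      simp [pvMachStep, hch]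
    rw [List.foldl_cons, hstep, ih hrest]
    simp

theorem pvMach_scan (p : List Char) (hp : ',' ∉ p) (dt di : Option (List Char))
    (key val : List Char) :
    p.foldl pvMachStep (dt, di, key, val, false) =
      if ':' ∈ p then (dt, di, key ++ p.takeWhile (· ≠ ':'), val ++ (p.dropWhile (· ≠ ':')).drop 1, true)
      else (dt, di, key ++ p, val, false) := by
  induction p generalizing key with
  | nil => simp
  | cons ch rest ih =>
    have hch : ch ≠ ',' := fun h => hp (by simp [h])
    have hrest : ',' ∉ rest := fun h => hp (by simp [h])
    by_cases hcol : ch = ':'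
    · subst hcol
      have hstep : pvMachStep (dt, di, key, val, false) ':' = (dt, di, key, val, true) := by
        simp [pvMachStep, hch]
      rw [List.foldl_cons, hstep, pvMach_seen rest hrest]
      simp
    · have hstep : pvMachStep (dt, di, key, val, false) ch = (dt, di, key ++ [ch], val, false) := by
        simp [pvMachStep, hch, hcol]
      rw [List.foldl_cons, hstep, ih hrest (key ++ [ch])]
      by_cases hmem : ':' ∈ rest
      · simp [hmem, hcol, Ne.symm hcol]
      · simp [hmem, Ne.symm hcol]

-- flushing one comma-free part followed by its comma applies the ghost pair step
theorem pvMach_flush (p : List Char) (hp : ',' ∉ p) (dt di : Option (List Char)) :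
    (p ++ [',']).foldl pvMachStep (dt, di, [], [], false) =
      ((pvPairStep (dt, di) p).1, (pvPairStep (dt, di) p).2, [], [], false) := by
  rw [List.foldl_append, pvMach_scan p hp]
  have hflush : ∀ (key val : List Char), pvMachStep (dt, di, key, val, true) ',' =
      (if PySem.Chars.strip key = "device_type".toList then (some (PySem.Chars.strip val), di, [], [], false)
       else if PySem.Chars.strip key = "device_id".toList then (dt, some (PySem.Chars.strip val), [], [], false)
       else (dt, di, [], [], false)) := by
    intro key val
    simp only [pvMachStep]
    split_ifs <;> rfl
  by_cases hcp : ':' ∈ p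
  · rw [if_pos hcp]
    simp only [List.nil_append, List.foldl_cons, List.foldl_nil]
    rw [hflush]
    unfold pvPairStep
    rw [if_pos hcp]
    split_ifs <;> rfl
  · rw [if_neg hcp]
    simp only [List.foldl_cons, List.foldl_nil]
    have hflush2 : pvMachStep (dt, di, [] ++ p, [], false) ',' = (dt, di, [], [], false) := by
      simp [pvMachStep]
    rw [hflush2]
    unfold pvPairStep
    rw [if_neg hcp]

theorem pvMach_parts (parts : List (List Char)) (hne : parts ≠ [])
    (h : ∀ p ∈ parts, ',' ∉ p) (dt di : Option (List Char)) :
    (pvJoinC parts ++ [',']).foldl pvMachStep (dt, di, [], [], false) =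
      ((parts.foldl pvPairStep (dt, di)).1, (parts.foldl pvPairStep (dt, di)).2, [], [], false) := by
  induction parts generalizing dt di with
  | nil => exact absurd rfl hne
  | cons p rest ih =>
    cases rest with
    | nil =>
      simp only [pvJoinC, List.foldl_cons, List.foldl_nil]
      exact pvMach_flush p (h p (by simp)) dt di
    | cons q qs =>
      have hjoin : pvJoinC (p :: q :: qs) ++ [','] =
          (p ++ [',']) ++ (pvJoinC (q :: qs) ++ [',']) := by
        simp [pvJoinC]
      rw [hjoin, List.foldl_append, pvMach_flush p (h p (by simp)) dt di]
      rw [ih (by simp) (fun r hr => h r (by simp [hr]))]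
      simp

-- ===== VERDICT (by name: the statement is the Claim_ definition above) =====
theorem normalize_device_py_spec : Claim_equal_normalize_device_py := by
  intro device _
  unfold Spec_normalize_device_py normalize_device_py normalize_device_py_alt
  cases device with
  | none => rfl
  | some d =>
    simp only
    by_cases hs : PySem.Str.startswith d "device" = true
    · rw [if_pos hs, if_neg (not_not_intro hs)]
      cases hget : ((PySem.Str.splitMax? d "{" 1).getD [])[1]? with
      | none =>
        have hlen : ((PySem.Str.splitMax? d "{" 1).getD []).length < 2 := by
          have := List.getElem?_eq_none_iff.mp hget; omega
        rw [if_pos hlen]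
      | some tail =>
        have hlen : ¬ ((PySem.Str.splitMax? d "{" 1).getD []).length < 2 := by
          have := (List.getElem?_eq_some_iff.mp hget).1; omega
        rw [if_neg hlen]
        have htail : ((PySem.Str.splitMax? d "{" 1).getD []).getD 1 "" = tail := by
          simp [List.getD_eq_getElem?_getD, hget]
        rw [htail]
        have hparts : ∀ inside : String, (PySem.Str.split? inside ",").getD [] =
            (pvSplitC inside.toList).map String.ofList := by
          intro inside
          simp only [PySem.Str.split?, PySem.Chars.split?]
          rw [show ("," : String).toList = [','] from rfl]
          simp [pvSplitOn_comma]
        have hA := pvA_pair (pvSplitC (((PySem.Str.splitMax? tail "}" 1).getD []).headD "").toList)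
          PySem.Dict.empty
        simp only [PySem.Dict.get?_empty, Option.map_none] at hA
        have hmach := pvMach_parts (pvSplitC (((PySem.Str.splitMax? tail "}" 1).getD []).headD "").toList)
          (pvSplitC_ne_nil _) (pvSplitC_comma_free _) none none
        rw [pvJoin_split] at hmach
        simp only [hparts, hA.1, hA.2, hmach]
        have hofeq : ∀ (x : List Char) (t : String), String.ofList x = t ↔ x = t.toList := by
          intro x t
          constructor
          · intro hx; have := congrArg String.toList hx; simpa [String.toList_ofList] using this
          · intro hx; rw [hx, String.ofList_toList]
        set P := (pvSplitC (((PySem.Str.splitMax? tail "}" 1).getD []).headD "").toList).foldl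
          pvPairStep (none, none) with hP
        cases h1 : P.1 with
        | none => rfl
        | some t =>
          simp only [Option.map_some]
          by_cases ht : t = []
          · subst ht
            rw [if_neg (by simp), if_neg (by simp)]
          · rw [if_pos (by simp [hofeq ,ht] : (String.ofList t ≠ "")), if_pos ht]
            cases h2 : P.2 with
            | none => rfl
            | some i =>
              simp only [Option.map_some]
              by_cases hi : i = [] ∨ i = "none".toList ∨ i = "default".toList
              · rw [if_pos (by rcases hi with h | h | h <;> simp [h, hofeq]), if_pos hi]
              · have hi1 : i ≠ [] := fun h => hi (Or.inl h)
                have hi2 : i ≠ "none".toList := fun h => hi (Or.inr (Or.inl h))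
                have hi3 : i ≠ "default".toList := fun h => hi (Or.inr (Or.inr h))
                have h3 : ¬ String.ofList i = "" := by simpa [hofeq] using hi1
                have h4 : ¬ String.ofList i = "none" := by simpa [hofeq] using hi2
                have h5 : ¬ String.ofList i = "default" := by simpa [hofeq] using hi3
                rw [if_neg (fun hor => hor.elim h3 (fun hor2 => hor2.elim h4 h5)), if_neg hi]
                have : String.ofList t ++ ":" ++ String.ofList i = String.ofList (t ++ ':' :: i) := by
                  have hinj : ∀ s u : String, s.toList = u.toList → s = u := by
                    intro s u h
                    rw [← String.ofList_toList (s := s), ← String.ofList_toList (s := u), h]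
                  apply hinj
                  simp [String.toList_append, String.toList_ofList]
                rw [this]
    · rw [if_neg hs, if_pos hs]
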